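-- pv_equiv track=rewrite | github.com/whitebluecloud/padp_ko | tasks/11th/seung_tile.py | solution
-- ===== SOURCE A (Python) =====
-- def solution(N):
--     if N > 80:
--         raise BaseException
--     ret = [0, 1]
--     for i in range(2, N + 1):
--         val = ret[i - 1] + ret[i - 2]
--         ret.append(val)
--     return ret[-1] * 4 + ret[-2] * 2
-- ===== SOURCE B (Python) =====
-- def solution(N):
--     if N > 80:
--         raise BaseException
--     if N <= 1:
--         return 4
--     a, b = _fib_pair(N - 1)  # (F(N-1), F(N))
--     return 4 * b + 2 * a
--
--
-- def _fib_pair(n):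
--     """Fast doubling: return (F(n), F(n+1)) for n >= 0."""
--     if n == 0:
--         return (0, 1)
--     a, b = _fib_pair(n >> 1)
--     c = a * (2 * b - a)
--     d = a * a + b * b
--     if n & 1:
--         return (d, c + d)
--     return (c, d)
-- ===== Notes on version B (the rewrite author's own statement) =====
-- stated objective: alternative
-- what changed: Replaces the linear list-building Fibonacci loop with a recursive fast-doubling pair computation over the bits of N, returning 4*F(N)+2*F(N-1) directly (4 for N<=1, where A's loop never runs).
import Mathlib
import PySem

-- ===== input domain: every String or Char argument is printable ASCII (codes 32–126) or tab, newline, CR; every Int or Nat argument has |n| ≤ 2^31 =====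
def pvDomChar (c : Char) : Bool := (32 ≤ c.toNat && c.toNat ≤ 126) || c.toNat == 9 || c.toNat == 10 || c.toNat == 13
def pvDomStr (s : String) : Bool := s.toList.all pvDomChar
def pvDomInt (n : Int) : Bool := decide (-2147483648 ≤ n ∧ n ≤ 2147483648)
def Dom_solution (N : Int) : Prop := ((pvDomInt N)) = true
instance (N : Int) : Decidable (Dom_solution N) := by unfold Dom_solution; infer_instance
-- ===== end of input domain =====

-- B replaces A's linear list-building Fibonacci loop by recursive fast doubling (alternative decomposition).

-- ===== PORT A =====
-- A raises BaseException for N > 80; those inputs are excluded by Pre_solution (the port returns 0 there).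
def solution (N : Int) : Int :=
  if N > 80 then 0
  else
    let ret : List Int :=
      (PySem.List.pyRange 2 (N + 1) 1).foldl
        (fun ret i =>
          let val := (PySem.List.pyGet? ret (i - 1)).getD 0 + (PySem.List.pyGet? ret (i - 2)).getD 0
          ret ++ [val])
        [0, 1]
    (PySem.List.pyGet? ret (-1)).getD 0 * 4 + (PySem.List.pyGet? ret (-2)).getD 0 * 2

-- ===== PORT B =====
-- fast doubling: fibPair n = (F(n), F(n+1)); fuel (= n) only makes the recursion structural
def fibPairAux : Nat → Nat → Int × Int
  | _, 0 => (0, 1)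
  | 0, _ + 1 => (0, 1)   -- unreachable: fuel ≥ n throughout
  | fuel + 1, n + 1 =>
    let p := fibPairAux fuel ((n + 1) >>> 1)
    let a := p.1
    let b := p.2
    let c := a * (2 * b - a)
    let d := a * a + b * b
    if (n + 1) &&& 1 = 1 then (d, c + d) else (c, d)

def fibPair (n : Nat) : Int × Int := fibPairAux n n

def solution_alt (N : Int) : Int :=
  if N > 80 then 0
  else if N ≤ 1 then 4
  else
    let p := fibPair (N - 1).toNat
    4 * p.2 + 2 * p.1

-- ===== PRECONDITION & SPEC =====
-- Pre_ excludes exactly the inputs N > 80 on which the Python A raises BaseException.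
def Pre_solution (N : Int) : Prop := N ≤ 80
instance (N : Int) : Decidable (Pre_solution N) := by unfold Pre_solution; infer_instance
def pvWitness_solution : Int := 10

def Spec_solution (N : Int) (out : Int) : Prop := out = solution_alt N
instance (N : Int) (out : Int) : Decidable (Spec_solution N out) := by unfold Spec_solution; infer_instance

-- ===== CLAIM (what is proved, stated in full; the proofs are below) =====
def Claim_equal_solution : Prop := ∀ (N : Int), Dom_solution N → Pre_solution N → Spec_solution N (solution N)

-- ===== LEMMAS AND PROOFS =====

theorem solution_low (N : Int) (h : N ≤ 1) : solution N = 4 := by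
  unfold solution
  rw [if_neg (by omega), PySem.List.pyRange_one_eq_nil (by omega)]
  decide

-- ===== VERDICT (by name: the statement is the Claim_ definition above) =====
theorem solution_spec : Claim_equal_solution := by
  intro N _ hpre
  unfold Spec_solution
  by_cases h1 : N ≤ 1
  · rw [solution_low N h1]
    unfold solution_alt
    rw [if_neg (by omega), if_pos h1]
  · unfold Pre_solution at hpre
    interval_cases N <;> decide
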